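-- pv_equiv track=rewrite | github.com/L316645200/LeetCode | LeetCode/每日一题/2024/20240829_3142. 判断矩阵是否满足条件[easy].py | satisfiesConditions
-- ===== SOURCE A (Python) =====
-- from typing import List
--
-- def satisfiesConditions(grid: List[List[int]]) -> bool:
--     m, n = len(grid), len(grid[0])
--     for i in range(m):
--         for j in range(n):
--             if i < m - 1 and grid[i][j] != grid[i+1][j]:
--                 return False
--             if j < n - 1 and grid[i][j] == grid[i][j+1]:
--                 return False
--     return True
-- ===== SOURCE B (Python) =====
-- from typing import List
--
-- def satisfiesConditions(grid: List[List[int]]) -> bool: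
--     first = grid[0]
--     n = len(first)
--     if any(row[:n] != first for row in grid):
--         return False
--     return all(a != b for a, b in zip(first, first[1:]))
-- ===== Notes on version B (the rewrite author's own statement) =====
-- stated objective: simpler
-- what changed: Replaces the interleaved 2-D cell scan with two separate passes: every row's n-prefix is compared whole against the first row (the vertical condition, by transitivity), then only the first row is scanned for equal adjacent entries.
-- outside the precondition, e.g. on satisfiesConditions([[1, 2], [3]]): A returns False, B returns False; on satisfiesConditions([[1, 2], [1]]): A raises IndexError, B returns False
import Mathlib
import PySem

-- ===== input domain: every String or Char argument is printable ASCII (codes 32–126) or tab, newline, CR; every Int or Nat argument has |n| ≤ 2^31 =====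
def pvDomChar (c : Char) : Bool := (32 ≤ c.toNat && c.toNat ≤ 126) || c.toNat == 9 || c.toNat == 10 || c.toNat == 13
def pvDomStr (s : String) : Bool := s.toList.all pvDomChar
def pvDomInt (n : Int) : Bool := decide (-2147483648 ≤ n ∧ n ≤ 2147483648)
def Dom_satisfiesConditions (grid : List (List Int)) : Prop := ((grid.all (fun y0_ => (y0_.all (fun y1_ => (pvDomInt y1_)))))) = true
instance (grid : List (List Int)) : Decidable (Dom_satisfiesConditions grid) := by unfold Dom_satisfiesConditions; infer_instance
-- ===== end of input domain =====

-- B replaces A's interleaved 2-D cell scan by two separate passes (every row's n-prefix is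
-- compared whole against the first row, then the first row is scanned for equal neighbours),
-- which is simpler; Pre_ keeps the grids on which A never raises (nonempty, no row shorter
-- than the first).


-- ===== PORT A =====
-- cell access grid[i][j] (Pre_ keeps every accessed index in range, so getD defaults are never hit)
def pvCell (grid : List (List Int)) (i j : Nat) : Int := (grid.getD i []).getD j 0

-- one cell of A's scan: true = no early `return False` fires at (i, j)
def pvACell (grid : List (List Int)) (m n i j : Nat) : Bool :=
  !(decide (i < m - 1) && decide (pvCell grid i j ≠ pvCell grid (i+1) j)) &&
  !(decide (j < n - 1) && decide (pvCell grid i j = pvCell grid i (j+1)))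

def satisfiesConditions (grid : List (List Int)) : Bool :=
  let m := grid.length
  let n := (grid.headD []).length
  (List.range m).all (fun i => (List.range n).all (fun j => pvACell grid m n i j))

-- ===== PORT B =====
def satisfiesConditions_alt (grid : List (List Int)) : Bool :=
  let first := grid.headD []
  let n := first.length
  grid.all (fun row => row.take n == first) &&
  (first.zip first.tail).all (fun p => p.1 != p.2)

-- ===== PRECONDITION & SPEC =====
-- Pre_ excludes the empty grid (A raises IndexError on grid[0]) and grids with a row shorter
-- than the first row, on which A raises IndexError unless an early `return False` happens to
-- fire first, an accident of its scan order (B returns False on every such grid).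
def Pre_satisfiesConditions (grid : List (List Int)) : Prop :=
  grid ≠ [] ∧ ∀ row ∈ grid, (grid.headD []).length ≤ row.length
instance (grid : List (List Int)) : Decidable (Pre_satisfiesConditions grid) := by
  unfold Pre_satisfiesConditions; infer_instance

def pvWitness_satisfiesConditions : List (List Int) := [[1, 2], [1, 2]]

def Spec_satisfiesConditions (grid : List (List Int)) (out : Bool) : Prop := out = satisfiesConditions_alt grid
instance (grid : List (List Int)) (out : Bool) : Decidable (Spec_satisfiesConditions grid out) := by unfold Spec_satisfiesConditions; infer_instance

-- ===== CLAIM (what is proved, stated in full; the proofs are below) =====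
def Claim_equal_satisfiesConditions : Prop := ∀ (grid : List (List Int)), Dom_satisfiesConditions grid → Pre_satisfiesConditions grid → Spec_satisfiesConditions grid (satisfiesConditions grid)

-- ===== LEMMAS AND PROOFS =====

-- A = true ↔ vertical and horizontal cell conditions over all in-range (i, j)
theorem pvA_iff (grid : List (List Int)) :
    satisfiesConditions grid = true ↔
      (∀ i < grid.length, ∀ j < (grid.headD []).length,
        (i < grid.length - 1 → pvCell grid i j = pvCell grid (i+1) j) ∧
        (j < (grid.headD []).length - 1 → pvCell grid i j ≠ pvCell grid i (j+1))) := by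
  simp only [satisfiesConditions, List.all_eq_true, List.mem_range, pvACell]
  constructor
  · intro h i hi j hj
    have := h i hi j hj
    simp only [Bool.and_eq_true, Bool.not_eq_true', Bool.and_eq_false_iff,
      decide_eq_false_iff_not, not_not] at this
    constructor
    · intro hlt
      rcases this.1 with h1 | h1
      · omega
      · simpa using h1
    · intro hlt
      rcases this.2 with h2 | h2
      · omega
      · simpa using h2
  · intro h i hi j hj
    obtain ⟨hv, hh⟩ := h i hi j hj
    simp only [Bool.and_eq_true, Bool.not_eq_true', Bool.and_eq_false_iff,
      decide_eq_false_iff_not, not_not]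
    constructor
    · by_cases hlt : i < grid.length - 1
      · right; simpa using hv hlt
      · left; omega
    · by_cases hlt : j < (grid.headD []).length - 1
      · right; simpa using hh hlt
      · left; omega

-- all over (l.zip l.tail) ↔ the predicate holds at every adjacent index pair
theorem pv_zip_tail_all (l : List Int) (p : Int × Int → Bool) :
    (l.zip l.tail).all p = true ↔
      ∀ j (h : j + 1 < l.length), p (l[j]'(by omega), l[j+1]'h) = true := by
  rw [List.all_eq_true]
  constructor
  · intro h j hj
    apply h
    have hjlen : j < (l.zip l.tail).length := by
      simp only [List.length_zip, List.length_tail]; omega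
    have he : (l.zip l.tail)[j]'hjlen = (l[j]'(by omega), l[j+1]'hj) := by
      rw [List.getElem_zip, List.getElem_tail]
    rw [← he]
    exact List.getElem_mem hjlen
  · intro h x hx
    obtain ⟨j, hj, hget⟩ := List.getElem_of_mem hx
    rw [List.getElem_zip, List.getElem_tail] at hget
    have hj' : j + 1 < l.length := by
      simp only [List.length_zip, List.length_tail] at hj; omega
    rw [← hget]
    exact h j hj'

-- B = true ↔ all rows equal the first row and the first row is adjacent-distinct
theorem pvB_iff (grid : List (List Int)) :
    satisfiesConditions_alt grid = true ↔
      (∀ row ∈ grid, row.take (grid.headD []).length = grid.headD []) ∧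
      (∀ j (h : j + 1 < (grid.headD []).length),
        (grid.headD [])[j]'(by omega) ≠ (grid.headD [])[j+1]'h) := by
  unfold satisfiesConditions_alt
  rw [Bool.and_eq_true, List.all_eq_true, pv_zip_tail_all]
  simp only [beq_iff_eq, bne_iff_ne, ne_eq]

theorem pvCell_eq (grid : List (List Int)) (i : Nat) (hi : i < grid.length) (j : Nat) :
    pvCell grid i j = (grid[i]'hi).getD j 0 := by
  simp [pvCell, List.getD_eq_getElem?_getD, List.getElem?_eq_getElem hi]

-- ===== VERDICT (by name: the statement is the Claim_ definition above) =====
theorem satisfiesConditions_spec : Claim_equal_satisfiesConditions := by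
  intro grid _ hpre
  obtain ⟨hne, hrect⟩ := hpre
  unfold Spec_satisfiesConditions
  have hlen0 : 0 < grid.length := List.length_pos_iff.mpr hne
  have hhead : grid.headD [] = grid[0]'hlen0 := by
    cases grid with
    | nil => simp at hne
    | cons a l => simp
  have key : satisfiesConditions grid = true ↔ satisfiesConditions_alt grid = true := by
    rw [pvA_iff, pvB_iff]
    constructor
    · rintro h
      -- vertical: every row's n-prefix equals the first row
      have rows_eq : ∀ i (hi : i < grid.length),
          (grid[i]'hi).take (grid.headD []).length = grid.headD [] := by
        intro i
        induction i with
        | zero => intro hi; rw [hhead]; exact List.take_length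
        | succ k ih =>
          intro hi
          have hk : k < grid.length := by omega
          have hlk : (grid.headD []).length ≤ (grid[k]'hk).length :=
            hrect _ (List.getElem_mem hk)
          have hlk1 : (grid.headD []).length ≤ (grid[k+1]'hi).length :=
            hrect _ (List.getElem_mem hi)
          have step : (grid[k]'hk).take (grid.headD []).length
              = (grid[k+1]'hi).take (grid.headD []).length := by
            apply List.ext_getElem
            · simp only [List.length_take]; omega
            · intro j hj1 hj2
              have hjn : j < (grid.headD []).length := by
                simp only [List.length_take] at hj1; omega
              have := (h k hk j hjn).1 (by omega)
              rw [pvCell_eq grid k hk, pvCell_eq grid (k+1) hi] at this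
              rw [List.getD_eq_getElem?_getD, List.getD_eq_getElem?_getD,
                List.getElem?_eq_getElem (by omega : j < (grid[k]'hk).length),
                List.getElem?_eq_getElem (by omega : j < (grid[k+1]'hi).length)] at this
              simpa [List.getElem_take] using this
          rw [← step]; exact ih hk
      constructor
      · intro row hrow
        obtain ⟨i, hi, hget⟩ := List.getElem_of_mem hrow
        rw [← hget]; exact rows_eq i hi
      · intro j hj
        have := (h 0 hlen0 j (by omega)).2 (by omega)
        rw [pvCell_eq grid 0 hlen0, pvCell_eq grid 0 hlen0, ← hhead] at this
        rwa [List.getD_eq_getElem?_getD, List.getD_eq_getElem?_getD,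
          List.getElem?_eq_getElem (by omega : j < (grid.headD []).length),
          List.getElem?_eq_getElem hj] at this
    · rintro ⟨h1, h2⟩ i hi j hjn
      have hli : (grid.headD []).length ≤ (grid[i]'hi).length :=
        hrect _ (List.getElem_mem hi)
      have cell_first : ∀ (i' : Nat) (hi' : i' < grid.length) (j' : Nat)
          (hj' : j' < (grid.headD []).length),
          pvCell grid i' j' = (grid.headD [])[j']'hj' := by
        intro i' hi' j' hj'
        have hli' : (grid.headD []).length ≤ (grid[i']'hi').length :=
          hrect _ (List.getElem_mem hi')
        have hro : (grid[i']'hi').take (grid.headD []).length = grid.headD [] :=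
          h1 _ (List.getElem_mem hi')
        rw [pvCell_eq grid i' hi', List.getD_eq_getElem?_getD,
          List.getElem?_eq_getElem (by omega : j' < (grid[i']'hi').length)]
        simp only [Option.getD_some]
        calc (grid[i']'hi')[j']'(by omega)
            = ((grid[i']'hi').take (grid.headD []).length)[j']'(by
                simp only [List.length_take]; omega) := by
              simp [List.getElem_take]
          _ = (grid.headD [])[j']'(by omega) := by
              simp only [hro]
      constructor
      · intro hlt
        have hi1 : i + 1 < grid.length := by omega
        rw [cell_first i hi j hjn, cell_first (i+1) hi1 j hjn]
      · intro hlt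
        rw [cell_first i hi j hjn, cell_first i hi (j+1) (by omega)]
        exact h2 j (by omega)
  cases hA : satisfiesConditions grid with
  | true => exact (key.mp hA).symm
  | false =>
    cases hB : satisfiesConditions_alt grid with
    | true => exact absurd (key.mpr hB) (by simp [hA])
    | false => rfl
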